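-- pv_equiv track=rewrite | github.com/juanpradana/MarketPulse | backend/modules/alpha_hunter_vpa.py | _resolve_spike_record
-- ===== SOURCE A (Python) =====
-- from typing import Dict, Any, List, Optional, Tuple
--
-- def _resolve_spike_record(
--
--     records: List[Dict[str, Any]],
--     target_date: str
-- ) -> Tuple[Optional[Dict[str, Any]], Optional[str]]:
--     for record in records:
--         if record["time"] == target_date:
--             return record, target_date
--
--     fallback = None
--     for record in records:
--         if record["time"] <= target_date:
--             fallback = record
--
--     if fallback:
--         return fallback, fallback["time"]
--
--     return None, None
-- ===== SOURCE B (Python) =====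
-- def _resolve_spike_record(records, target_date):
--     fallback = None
--     for record in records:
--         t = record["time"]
--         if t == target_date:
--             return record, target_date
--         if t <= target_date:
--             fallback = record
--     if fallback:
--         return fallback, fallback["time"]
--     return None, None
-- ===== Notes on version B (the rewrite author's own statement) =====
-- stated objective: simpler
-- what changed: Collapses A's two sequential scans (find exact match, then rescan for the latest record with time <= target) into one loop that returns on the first exact match and maintains the <= fallback as it goes, so the list is traversed once.
import Mathlib
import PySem

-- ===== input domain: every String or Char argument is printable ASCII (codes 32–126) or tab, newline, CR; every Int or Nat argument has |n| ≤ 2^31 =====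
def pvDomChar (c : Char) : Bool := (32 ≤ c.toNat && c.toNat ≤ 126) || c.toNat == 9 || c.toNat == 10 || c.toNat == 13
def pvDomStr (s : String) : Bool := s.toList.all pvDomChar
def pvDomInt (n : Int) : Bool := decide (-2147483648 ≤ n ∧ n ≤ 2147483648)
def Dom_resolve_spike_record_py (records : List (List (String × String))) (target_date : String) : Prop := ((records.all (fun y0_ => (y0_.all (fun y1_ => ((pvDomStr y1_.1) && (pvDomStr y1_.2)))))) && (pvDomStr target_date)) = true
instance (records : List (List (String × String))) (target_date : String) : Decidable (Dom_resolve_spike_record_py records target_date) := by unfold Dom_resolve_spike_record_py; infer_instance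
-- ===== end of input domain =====

-- B collapses A's two sequential scans into one loop (return on first exact match, keep the
-- latest `<=` record as a running fallback); single pass, same return value (objective: simpler).

-- record["time"]: dict lookup = first matching key in the association list; the "" default is
-- only reached when the key is absent, which Pre_ excludes (Python raises KeyError there).
def pvTime (r : List (String × String)) : String := (r.lookup "time").getD ""

-- ===== PORT A =====
-- A's first loop: return the first record whose "time" equals target_date.
def pvAFirst (records : List (List (String × String))) (target_date : String) : Option (List (String × String)) :=
  match records with
  | [] => none
  | r :: rest => if pvTime r = target_date then some r else pvAFirst rest target_date

-- A's second loop: fallback := last record with "time" <= target_date.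
def pvAStep (target_date : String) (fb : Option (List (String × String))) (r : List (String × String)) : Option (List (String × String)) :=
  if pvTime r ≤ target_date then some r else fb

def resolve_spike_record_py (records : List (List (String × String))) (target_date : String) : (Option (List (String × String))) × Option String :=
  match pvAFirst records target_date with
  | some r => (some r, some target_date)
  | none =>
    match records.foldl (pvAStep target_date) none with
    | some fb => if fb.isEmpty then (none, none) else (some fb, some (pvTime fb))  -- `if fallback:` — an empty dict is falsy
    | none => (none, none)

-- ===== PORT B =====
def pvBLoop (records : List (List (String × String))) (target_date : String) (fb : Option (List (String × String))) : (Option (List (String × String))) × Option String :=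
  match records with
  | [] =>
    match fb with
    | some f => if f.isEmpty then (none, none) else (some f, some (pvTime f))  -- `if fallback:` truthiness, as in Source B
    | none => (none, none)
  | r :: rest =>
    let t := pvTime r
    if t = target_date then (some r, some target_date)
    else pvBLoop rest target_date (if t ≤ target_date then some r else fb)

def resolve_spike_record_py_alt (records : List (List (String × String))) (target_date : String) : (Option (List (String × String))) × Option String :=
  pvBLoop records target_date none

-- ===== PRECONDITION & SPEC =====
-- Pre_ excludes exactly the inputs on which Python A raises KeyError (B raises identically there):
-- some record without a "time" key is reached by the scan, i.e. every earlier record has a "time"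
-- key and none of them equals target_date.
def Pre_resolve_spike_record_py (records : List (List (String × String))) (target_date : String) : Prop :=
  ∀ i, i < records.length →
    ((records.getD i []).lookup "time").isSome = false →
    (∀ k, k < i → ((records.getD k []).lookup "time").isSome = true) →
    ∃ j, j < i ∧ (records.getD j []).lookup "time" = some target_date
instance (records : List (List (String × String))) (target_date : String) : Decidable (Pre_resolve_spike_record_py records target_date) := by unfold Pre_resolve_spike_record_py; infer_instance

def pvWitness_resolve_spike_record_py : (List (List (String × String))) × String := ([[("time", "2024-01-01")], [("time", "2024-01-02")]], "2024-01-03")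

def Spec_resolve_spike_record_py (records : List (List (String × String))) (target_date : String) (out : (Option (List (String × String))) × Option String) : Prop := out = resolve_spike_record_py_alt records target_date
instance (records : List (List (String × String))) (target_date : String) (out : (Option (List (String × String))) × Option String) : Decidable (Spec_resolve_spike_record_py records target_date out) := by unfold Spec_resolve_spike_record_py; infer_instance

-- ===== CLAIM (what is proved, stated in full; the proofs are below) =====
def Claim_equal_resolve_spike_record_py : Prop := ∀ (records : List (List (String × String))) (target_date : String), Dom_resolve_spike_record_py records target_date → Pre_resolve_spike_record_py records target_date → Spec_resolve_spike_record_py records target_date (resolve_spike_record_py records target_date)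

-- ===== LEMMAS AND PROOFS =====

-- B's single loop, started with accumulator fb, computes A's shape: the first exact match if
-- there is one, otherwise A's tail applied to A's fallback fold continued from fb.
theorem pvBLoop_eq (records : List (List (String × String))) (target_date : String) (fb : Option (List (String × String))) :
    pvBLoop records target_date fb =
      match pvAFirst records target_date with
      | some r => (some r, some target_date)
      | none =>
        match records.foldl (pvAStep target_date) fb with
        | some f => if f.isEmpty then (none, none) else (some f, some (pvTime f))
        | none => (none, none) := by
  induction records generalizing fb with
  | nil => rfl
  | cons r rest ih =>
    by_cases h : pvTime r = target_date
    · simp [pvBLoop, pvAFirst, h]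
    · simp only [pvBLoop, pvAFirst, if_neg h, List.foldl_cons]
      rw [ih]
      rfl

-- ===== VERDICT (by name: the statement is the Claim_ definition above) =====
theorem resolve_spike_record_py_spec : Claim_equal_resolve_spike_record_py := by
  intro records target_date _ _
  unfold Spec_resolve_spike_record_py resolve_spike_record_py resolve_spike_record_py_alt
  rw [pvBLoop_eq]
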